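-- pv_equiv track=rewrite | github.com/Olszewski-Jakub/Matury | Probna ambityni/ZAdanie 2.3.py | minus_binary_to_decimal
-- ===== SOURCE A (Python) =====
-- def minus_binary_to_decimal(minus_binary):
--     decimal = 0
--     power = 0
--     for i in range(len(minus_binary)):
--         if minus_binary[i] == '1':
--             decimal -= pow(-2, power)
--         power += 1
--     return decimal
-- ===== SOURCE B (Python) =====
-- def minus_binary_to_decimal(minus_binary):
--     acc = 0
--     for c in reversed(minus_binary):
--         acc = acc * -2 + (1 if c == '1' else 0)
--     return -acc
-- ===== Notes on version B (the rewrite author's own statement) =====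
-- stated objective: simpler
-- what changed: Replaces the power counter and pow(-2, power) per set digit with a single Horner accumulator over the string read back-to-front, negated at the end.
import Mathlib
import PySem

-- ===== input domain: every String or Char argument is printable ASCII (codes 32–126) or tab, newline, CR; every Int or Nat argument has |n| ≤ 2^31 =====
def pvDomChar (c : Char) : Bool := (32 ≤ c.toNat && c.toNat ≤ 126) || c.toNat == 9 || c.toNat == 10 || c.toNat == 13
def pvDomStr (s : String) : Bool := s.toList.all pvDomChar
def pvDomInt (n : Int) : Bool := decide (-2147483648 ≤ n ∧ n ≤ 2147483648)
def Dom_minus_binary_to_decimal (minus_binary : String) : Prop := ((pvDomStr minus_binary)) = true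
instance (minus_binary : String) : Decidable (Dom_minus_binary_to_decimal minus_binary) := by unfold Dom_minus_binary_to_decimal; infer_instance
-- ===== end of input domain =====

-- B replaces the power counter and pow(-2,power) with one reversed Horner accumulator, negated at the end (simpler).

-- ===== PORT A =====
-- loop 'for i in range(len(s))' reading s[i] ported as a fold over the characters,
-- carrying (decimal, power) exactly as A does; pow(-2, power) is (-2)^power.
def minus_binary_to_decimal (minus_binary : String) : Int :=
  (minus_binary.toList.foldl
    (fun (st : Int × Nat) c =>
      ((if c = '1' then st.1 - (-2 : Int) ^ st.2 else st.1), st.2 + 1))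
    (0, 0)).1

-- ===== PORT B =====
def minus_binary_to_decimal_alt (minus_binary : String) : Int :=
  -(minus_binary.toList.reverse.foldl
      (fun (acc : Int) c => acc * (-2) + (if c = '1' then 1 else 0)) 0)

-- ===== PRECONDITION & SPEC =====
def Spec_minus_binary_to_decimal (minus_binary : String) (out : Int) : Prop := out = minus_binary_to_decimal_alt minus_binary
instance (minus_binary : String) (out : Int) : Decidable (Spec_minus_binary_to_decimal minus_binary out) := by unfold Spec_minus_binary_to_decimal; infer_instance

-- ===== CLAIM (what is proved, stated in full; the proofs are below) =====
def Claim_equal_minus_binary_to_decimal : Prop := ∀ (minus_binary : String), Dom_minus_binary_to_decimal minus_binary → Spec_minus_binary_to_decimal minus_binary (minus_binary_to_decimal minus_binary)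

-- ===== LEMMAS AND PROOFS =====

-- ===== VERDICT (by name: the statement is the Claim_ definition above) =====
-- H l = Horner value of l via foldr (equal to B's reversed foldl by List.foldl_reverse)
def pvH (l : List Char) : Int :=
  l.foldr (fun c acc => acc * (-2) + (if c = '1' then 1 else 0)) 0

theorem pvA_fold (l : List Char) (d : Int) (p : Nat) :
    (l.foldl
      (fun (st : Int × Nat) c =>
        ((if c = '1' then st.1 - (-2 : Int) ^ st.2 else st.1), st.2 + 1))
      (d, p)).1 = d - (-2 : Int) ^ p * pvH l := by
  induction l generalizing d p with
  | nil => simp [pvH]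
  | cons c t ih =>
      have hrec : pvH (c :: t) = pvH t * (-2) + (if c = '1' then 1 else 0) := rfl
      simp only [List.foldl_cons]
      rw [ih, hrec]
      by_cases hc : c = '1' <;> simp only [hc, if_true, if_false, pow_succ] <;> ring

theorem minus_binary_to_decimal_spec : Claim_equal_minus_binary_to_decimal := by
  intro s _
  unfold Spec_minus_binary_to_decimal minus_binary_to_decimal minus_binary_to_decimal_alt
  rw [List.foldl_reverse, pvA_fold]
  simp [pvH]
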